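-- pv_equiv track=rewrite | github.com/shiyi-pan/HGTector | hgtector/search.py | subset_seqs
-- ===== SOURCE A (Python) =====
-- def subset_seqs(seqs, queries=None, maxchars=None):
--     """Generate subsets of sequences based on cutoffs.
--
--     Parameters
--     ----------
--     seqs : list of tuple
--         sequences to subset (id, sequence)
--     queries : int, optional
--         number of query sequences per subset
--     maxchars : int, optional
--         maximum total length of query sequences per subset
--
--     Returns
--     -------
--     list
--         subsets
--
--     Raises
--     ------
--     If any sequence exceeds maxchars.
--     """
--     if not maxchars:
--
--         # no subsetting
--         if not queries:
--             return [seqs]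
--
--         # subsetting only by queries
--         subsets = []
--         for i in range(0, len(seqs), queries):
--             subsets.append(seqs[i:i + queries])
--         return subsets
--
--     # subsetting by maxchars, and by queries if applicable
--     subsets = [[]]
--     cquery, cchars = 0, 0
--     for id_, seq in seqs:
--         chars = len(seq)
--         if chars > maxchars:
--             raise ValueError('Sequence {} exceeds maximum allowed length '
--                              '{} for search.'.format(id_, maxchars))
--         if cchars + chars > maxchars or queries == cquery > 0:
--             subsets.append([])
--             cquery, cchars = 0, 0
--         subsets[-1].append((id_, seq))
--         cquery += 1
--         cchars += chars
--     return subsets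
-- ===== SOURCE B (Python) =====
-- def subset_seqs(seqs, queries=None, maxchars=None):
--     if not maxchars:
--         if not queries:
--             return [seqs]
--         return [seqs[i:i + queries] for i in range(0, len(seqs), queries)]
--     # first pass: record start index of each subset
--     bounds = [0]
--     cquery, cchars = 0, 0
--     for i, (id_, seq) in enumerate(seqs):
--         chars = len(seq)
--         if chars > maxchars:
--             raise ValueError('Sequence {} exceeds maximum allowed length '
--                              '{} for search.'.format(id_, maxchars))
--         if cchars + chars > maxchars or queries == cquery > 0:
--             bounds.append(i)
--             cquery, cchars = 0, 0
--         cquery += 1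
--         cchars += chars
--     bounds.append(len(seqs))
--     # second pass: materialize subsets by slicing between consecutive bounds
--     return [seqs[a:b] for a, b in zip(bounds, bounds[1:])]
-- ===== Notes on version B (the rewrite author's own statement) =====
-- stated objective: alternative
-- what changed: The maxchars branch is decomposed into two passes: a first pass over enumerate(seqs) that only records the start index of each subset in a bounds list, and a second pass that materializes the subsets by slicing seqs between consecutive bounds (instead of A's single pass that appends each sequence into subsets[-1] in place); the query-only branch becomes a slice comprehension.
import Mathlib
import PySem

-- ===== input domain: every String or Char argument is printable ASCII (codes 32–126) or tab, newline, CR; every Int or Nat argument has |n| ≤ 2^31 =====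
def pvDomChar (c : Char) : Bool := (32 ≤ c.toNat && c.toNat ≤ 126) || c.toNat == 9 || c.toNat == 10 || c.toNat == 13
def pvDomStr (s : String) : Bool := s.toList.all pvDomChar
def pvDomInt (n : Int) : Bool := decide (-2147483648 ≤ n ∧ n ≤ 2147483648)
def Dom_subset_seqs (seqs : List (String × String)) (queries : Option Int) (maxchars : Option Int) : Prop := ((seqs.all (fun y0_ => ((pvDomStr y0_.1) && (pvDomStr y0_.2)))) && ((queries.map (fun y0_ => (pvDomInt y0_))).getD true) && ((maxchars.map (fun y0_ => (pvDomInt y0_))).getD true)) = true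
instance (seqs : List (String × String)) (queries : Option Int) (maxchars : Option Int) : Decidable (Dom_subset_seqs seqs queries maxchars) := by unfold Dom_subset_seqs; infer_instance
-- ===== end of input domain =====

-- B restructures the maxchars branch as a boundary-index first pass plus a slicing second
-- pass (objective: alternative decomposition, same cost); equivalence is about return values.

-- ===== PORT A =====
-- Python truthiness of an optional int argument ('if not maxchars' / 'if not queries')
def pvFalsy : Option Int → Bool
  | none => true
  | some v => v == 0

-- Python's chained comparison 'queries == cquery > 0' = (queries == cquery) and (cquery > 0);
-- queries may be None, which is == to no int.
def pvChain (queries : Option Int) (cq : Int) : Bool :=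
  match queries with
  | some q => q == cq && decide (0 < cq)
  | none => false

-- A's maxchars loop. State: subsets is kept as done ++ [cur] (cur = subsets[-1], the list
-- being appended to in place). The 'chars > maxchars' ValueError branch of A is excluded by
-- Pre_subset_seqs, so it is not modelled here.
def pvLoopA (queries : Option Int) (m : Int) :
    List (String × String) → List (List (String × String)) → List (String × String) →
    Int → Int → List (List (String × String))
  | [], done, cur, _, _ => done ++ [cur]
  | p :: rest, done, cur, cq, cc =>
    let chars : Int := PySem.Str.len p.2
    if cc + chars > m ∨ pvChain queries cq = true then
      pvLoopA queries m rest (done ++ [cur]) [p] 1 chars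
    else
      pvLoopA queries m rest done (cur ++ [p]) (cq + 1) (cc + chars)

def subset_seqs (seqs : List (String × String)) (queries : Option Int) (maxchars : Option Int) : List (List (String × String)) :=
  if pvFalsy maxchars then
    if pvFalsy queries then [seqs]
    else
      let q := queries.getD 0
      (PySem.List.pyRange 0 (seqs.length : Int) q).foldl
        (fun subsets i => subsets ++ [PySem.List.slice seqs (some i) (some (i + q))]) []
  else
    pvLoopA queries (maxchars.getD 0) seqs [] [] 0 0

-- ===== PORT B =====
-- B's first pass: record the start index of every subset (bounds starts as [0]).
-- The 'chars > maxchars' ValueError branch of B is excluded by Pre_subset_seqs likewise.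
def pvLoopB (queries : Option Int) (m : Int) :
    List (Int × (String × String)) → List Int → Int → Int → List Int
  | [], bounds, _, _ => bounds
  | ip :: rest, bounds, cq, cc =>
    let chars : Int := PySem.Str.len ip.2.2
    if cc + chars > m ∨ pvChain queries cq = true then
      pvLoopB queries m rest (bounds ++ [ip.1]) 1 chars
    else
      pvLoopB queries m rest bounds (cq + 1) (cc + chars)

-- B's second pass: '[seqs[a:b] for a, b in zip(bounds, bounds[1:])]'
def pvSlices (seqs : List (String × String)) (bs : List Int) : List (List (String × String)) :=
  (bs.zip bs.tail).map (fun ab => PySem.List.slice seqs (some ab.1) (some ab.2))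

def subset_seqs_alt (seqs : List (String × String)) (queries : Option Int) (maxchars : Option Int) : List (List (String × String)) :=
  if pvFalsy maxchars then
    if pvFalsy queries then [seqs]
    else
      let q := queries.getD 0
      (PySem.List.pyRange 0 (seqs.length : Int) q).map
        (fun i => PySem.List.slice seqs (some i) (some (i + q)))
  else
    let m := maxchars.getD 0
    let bs := pvLoopB queries m (PySem.List.enumerate seqs) [0] 0 0 ++ [(seqs.length : Int)]
    pvSlices seqs bs

-- ===== PRECONDITION & SPEC =====
-- Pre_ excludes exactly the inputs on which A raises ValueError: a truthy maxchars together
-- with some sequence longer than maxchars (B raises the same ValueError there).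
def Pre_subset_seqs (seqs : List (String × String)) (queries : Option Int) (maxchars : Option Int) : Prop :=
  (match maxchars with
   | none => true
   | some m => m == 0 || seqs.all (fun p => decide (PySem.Str.len p.2 ≤ m))) = true
instance (seqs : List (String × String)) (queries : Option Int) (maxchars : Option Int) : Decidable (Pre_subset_seqs seqs queries maxchars) := by unfold Pre_subset_seqs; infer_instance

def pvWitness_subset_seqs : (List (String × String)) × Option Int × Option Int :=
  ([("a", "xx"), ("b", "y"), ("c", "zz")], some 2, some 3)

def Spec_subset_seqs (seqs : List (String × String)) (queries : Option Int) (maxchars : Option Int) (out : List (List (String × String))) : Prop := out = subset_seqs_alt seqs queries maxchars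
instance (seqs : List (String × String)) (queries : Option Int) (maxchars : Option Int) (out : List (List (String × String))) : Decidable (Spec_subset_seqs seqs queries maxchars out) := by unfold Spec_subset_seqs; infer_instance

-- ===== CLAIM (what is proved, stated in full; the proofs are below) =====
def Claim_equal_subset_seqs : Prop := ∀ (seqs : List (String × String)) (queries : Option Int) (maxchars : Option Int), Dom_subset_seqs seqs queries maxchars → Pre_subset_seqs seqs queries maxchars → Spec_subset_seqs seqs queries maxchars (subset_seqs seqs queries maxchars)

-- ===== LEMMAS AND PROOFS =====

theorem pvSlices_cons_cons (s : List (String × String)) (x y : Int) (l : List Int) :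
    pvSlices s (x :: y :: l) = PySem.List.slice s (some x) (some y) :: pvSlices s (y :: l) := by
  simp [pvSlices]

theorem pvSlices_snoc (s : List (String × String)) (ys : List Int) (a b : Int) :
    pvSlices s (ys ++ [a, b]) = pvSlices s (ys ++ [a]) ++ [PySem.List.slice s (some a) (some b)] := by
  induction ys with
  | nil => simp [pvSlices]
  | cons y ys ih =>
    cases ys with
    | nil => simp [pvSlices]
    | cons z zs =>
      simp only [List.cons_append, pvSlices_cons_cons] at ih ⊢
      rw [ih]

theorem pv_main (queries : Option Int) (m : Int) :
    ∀ (rest full : List (String × String)) (init : List Int) (j k : Nat) (cq cc : Int),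
    rest = full.drop k → j ≤ k → k ≤ full.length →
    pvLoopA queries m rest (pvSlices full (init ++ [(j : Int)])) ((full.drop j).take (k - j)) cq cc
      = pvSlices full (pvLoopB queries m (PySem.List.enumerate rest (k : Int)) (init ++ [(j : Int)]) cq cc ++ [(full.length : Int)]) := by
  intro rest
  induction rest with
  | nil =>
    intro full init j k cq cc hrest hjk hk
    have hk' : k = full.length := by
      have := List.drop_eq_nil_iff.mp hrest.symm
      omega
    subst hk'
    simp only [pvLoopA, PySem.List.enumerate, pvLoopB]
    have h2 : (init ++ [(j : Int)]) ++ [(full.length : Int)]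
        = init ++ [(j : Int), (full.length : Int)] := by simp
    rw [h2, pvSlices_snoc, PySem.List.slice_natCast]
  | cons p rest ih =>
    intro full init j k cq cc hrest hjk hk
    have hklt : k < full.length := by
      by_contra h
      have : full.drop k = [] := List.drop_eq_nil_iff.mpr (by omega)
      rw [this] at hrest; simp at hrest
      
    have hgetk : full[k]? = some p := by
      have h0 : (full.drop k)[0]? = full[k]? := by
        simp [List.getElem?_drop (xs := full) (i := k) (j := 0)]
      rw [← h0, ← hrest]; rfl
    have hrest' : rest = full.drop (k + 1) := by
      have : full.drop (k + 1) = (full.drop k).drop 1 := by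
        rw [List.drop_drop]
      rw [this, ← hrest]; rfl
    simp only [pvLoopA, PySem.List.enumerate_cons, pvLoopB]
    by_cases hc : cc + PySem.Str.len p.2 > m ∨ pvChain queries cq = true
    · simp only [if_pos hc]
      have hdone : pvSlices full (init ++ [(j : Int)]) ++ [(full.drop j).take (k - j)]
          = pvSlices full ((init ++ [(j : Int)]) ++ [(k : Int)]) := by
        have : (init ++ [(j : Int)]) ++ [(k : Int)] = init ++ [(j : Int), (k : Int)] := by simp
        rw [this, pvSlices_snoc, PySem.List.slice_natCast]
      have hcur : [p] = (full.drop k).take (k + 1 - k) := by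
        have : k + 1 - k = 1 := by omega
        rw [this, ← hrest]; rfl
      rw [hdone, hcur]
      have hcast : (k : Int) + 1 = ((k + 1 : Nat) : Int) := by push_cast; ring
      rw [hcast]
      exact ih full (init ++ [(j : Int)]) k (k + 1) 1 (PySem.Str.len p.2) hrest' (by omega) (by omega)
    · simp only [if_neg hc]
      have hcur : (full.drop j).take (k - j) ++ [p] = (full.drop j).take (k + 1 - j) := by
        have h1 : k + 1 - j = (k - j) + 1 := by omega
        have h2 : (full.drop j)[k - j]? = some p := by
          rw [List.getElem?_drop]
          have : j + (k - j) = k := by omega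
          rw [this, hgetk]
        rw [h1, List.take_add_one, h2]; rfl
      rw [hcur]
      have hcast : (k : Int) + 1 = ((k + 1 : Nat) : Int) := by push_cast; ring
      rw [hcast]
      exact ih full init j (k + 1) (cq + 1) (cc + PySem.Str.len p.2) hrest' (by omega) (by omega)

-- ===== VERDICT (by name: the statement is the Claim_ definition above) =====
theorem subset_seqs_spec : Claim_equal_subset_seqs := by
  intro seqs queries maxchars _ _
  unfold Spec_subset_seqs subset_seqs subset_seqs_alt
  by_cases hmax : pvFalsy maxchars = true
  · simp only [if_pos hmax]
    by_cases hq : pvFalsy queries = true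
    · simp only [if_pos hq]
    · simp only [if_neg hq]
      simpa using PySem.List.foldl_append_singleton_eq_map
        (fun i => PySem.List.slice seqs (some i) (some (i + queries.getD 0)))
        (PySem.List.pyRange 0 (seqs.length : Int) (queries.getD 0)) []
  · simp only [if_neg hmax]
    have h := pv_main queries (maxchars.getD 0) seqs seqs [] 0 0 0 0 rfl (by omega) (by omega)
    simpa [pvSlices] using h
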